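-- pv_equiv track=rewrite | github.com/sheikhshack/50.042_FCS | Lab 6/ecb.py | remove_padding_v2
-- ===== SOURCE A (Python) =====
-- def remove_padding_v2(block):
--     # PKCS7 standard
--     pad = block & 0xff
--     if pad > 0x10:
--         return block, 8
--     for i in range(pad):
--         # runs across to make sure that it is indded a padding
--         temp_block = (block >> 8 * i) & 0xff
--         if temp_block != pad:
--             return block, 8
--     block = block >> 8 * pad
--     return block, 8-pad
-- ===== SOURCE B (Python) =====
-- def remove_padding_v2(block):
--     # PKCS7 standard, checked with one masked comparison instead of a per-byte loop
--     pad = block & 0xff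
--     if pad > 0x10:
--         return block, 8
--     mask = (1 << (8 * pad)) - 1
--     expected = pad * (mask // 0xff)
--     if (block & mask) != expected:
--         return block, 8
--     return block >> (8 * pad), 8 - pad
-- ===== Notes on version B (the rewrite author's own statement) =====
-- stated objective: alternative
-- what changed: replaces the per-byte verification loop over range(pad) with a single masked-arithmetic comparison: block & ((1<<8*pad)-1) is tested against the pad value repeated pad times, computed as pad*(mask//0xff)
import Mathlib
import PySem

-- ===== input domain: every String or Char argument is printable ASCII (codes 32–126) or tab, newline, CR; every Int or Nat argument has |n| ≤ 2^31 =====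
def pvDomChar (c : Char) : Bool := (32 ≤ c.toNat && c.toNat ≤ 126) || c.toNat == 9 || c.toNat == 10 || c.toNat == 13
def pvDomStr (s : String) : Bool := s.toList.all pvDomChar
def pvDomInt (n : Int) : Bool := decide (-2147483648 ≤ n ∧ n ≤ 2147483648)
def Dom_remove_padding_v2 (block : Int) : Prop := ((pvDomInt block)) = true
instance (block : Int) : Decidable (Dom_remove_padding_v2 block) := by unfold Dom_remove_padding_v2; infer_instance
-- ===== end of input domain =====

-- ===== PORT A =====
-- Loop body of A's 'for i in range(pad)' with its early return; 'block >> 8*i' is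
-- ported as 'block >>> (8*i).toNat', exact since every i drawn from range(pad) is ≥ 0.
def remove_padding_v2_loop (block pad : Int) : List Int → Int × Int
  | [] => (block >>> (8 * pad).toNat, 8 - pad)
  | i :: rest =>
    let temp_block := PySem.Int.band (block >>> (8 * i).toNat) 0xff
    if temp_block ≠ pad then (block, 8)
    else remove_padding_v2_loop block pad rest

def remove_padding_v2 (block : Int) : Int × Int :=
  let pad := PySem.Int.band block 0xff
  if pad > 0x10 then (block, 8)
  else remove_padding_v2_loop block pad (PySem.List.pyRange 0 pad 1)

-- ===== PORT B =====
-- One masked comparison instead of the per-byte loop; 'pad ≥ 0' always, so the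
-- shift amounts '8*pad' are ported with '.toNat', exact.
def remove_padding_v2_alt (block : Int) : Int × Int :=
  let pad := PySem.Int.band block 0xff
  if pad > 0x10 then (block, 8)
  else
    let mask := ((1 : Int) <<< (8 * pad).toNat) - 1
    let expected := pad * PySem.Int.floordiv mask 0xff
    if PySem.Int.band block mask ≠ expected then (block, 8)
    else (block >>> (8 * pad).toNat, 8 - pad)

-- ===== PRECONDITION & SPEC =====
def Spec_remove_padding_v2 (block : Int) (out : Int × Int) : Prop := out = remove_padding_v2_alt block
instance (block : Int) (out : Int × Int) : Decidable (Spec_remove_padding_v2 block out) := by unfold Spec_remove_padding_v2; infer_instance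

-- ===== CLAIM (what is proved, stated in full; the proofs are below) =====
def Claim_equal_remove_padding_v2 : Prop := ∀ (block : Int), Dom_remove_padding_v2 block → Spec_remove_padding_v2 block (remove_padding_v2 block)

-- ===== LEMMAS AND PROOFS =====

-- Python's  a & (2^k - 1)  is  a mod 2^k  (two's-complement semantics, any sign of a).
theorem band_two_pow_sub_one (a : Int) (k : Nat) :
    PySem.Int.band a ((2 : Int) ^ k - 1) = a % (2 : Int) ^ k := by
  have hk : (1 : Nat) ≤ 2 ^ k := Nat.one_le_two_pow
  have hkpos : (0 : Int) < 2 ^ k := by positivity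
  have hcast : ((2 : Int) ^ k - 1) = (((2 ^ k - 1 : Nat)) : Int) := by
    push_cast [hk]; ring
  by_cases ha : 0 ≤ a
  · conv_lhs => rw [hcast, ← Int.toNat_of_nonneg ha]
    rw [PySem.Int.band_natCast, Nat.and_two_pow_sub_one_eq_mod]
    conv_rhs => rw [← Int.toNat_of_nonneg ha]
    push_cast
    ring
  · have hb : (0 : Int) ≤ 2 ^ k - 1 := by omega
    simp only [PySem.Int.band, if_neg ha, if_pos hb]
    set m := (-a - 1).toNat with hmdef
    have ham : a = -(m : Int) - 1 := by omega
    have htn : ((2 : Int) ^ k - 1).toNat = 2 ^ k - 1 := by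
      rw [hcast, Int.toNat_natCast]
    have hand : (2 ^ k - 1) &&& m = m % 2 ^ k := by
      rw [Nat.and_comm, Nat.and_two_pow_sub_one_eq_mod]
    have hrlt : m % 2 ^ k < 2 ^ k := Nat.mod_lt _ (by positivity)
    have hmdiv' : (2 : Int) ^ k * ((m / 2 ^ k : Nat) : Int) + ((m % 2 ^ k : Nat) : Int) = (m : Int) := by
      exact_mod_cast congrArg (Nat.cast : Nat → Int) (Nat.div_add_mod m (2 ^ k))
    have h1 : a = ((2 : Int) ^ k - 1 - ((m % 2 ^ k : Nat) : Int)) + (2 : Int) ^ k * (-(((m / 2 ^ k : Nat) : Int)) - 1) := by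
      rw [ham]; linarith [hmdiv']
    have hr1 : ((m % 2 ^ k : Nat) : Int) < 2 ^ k := by exact_mod_cast hrlt
    have hr0 : (0 : Int) ≤ ((m % 2 ^ k : Nat) : Int) := by positivity
    have key : a % (2 : Int) ^ k = (2 : Int) ^ k - 1 - ((m % 2 ^ k : Nat) : Int) := by
      rw [h1, Int.add_mul_emod_self_left]
      exact Int.emod_eq_of_lt (by omega) (by omega)
    rw [key, htn, hand]
    have hle : m % 2 ^ k ≤ 2 ^ k - 1 := by omega
    push_cast [hle, hk]
    ring

-- the integer 0x0101…01 with n bytes: (256^n - 1) / 255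
def repUnit : Nat → Int
  | 0 => 0
  | n + 1 => 256 * repUnit n + 1

theorem repUnit_mul (n : Nat) : repUnit n * 255 = 256 ^ n - 1 := by
  induction n with
  | zero => simp [repUnit]
  | succ n ih => simp only [repUnit, pow_succ]; ring_nf; ring_nf at ih; omega

theorem repUnit_ediv (n : Nat) : ((256 : Int) ^ n - 1) / 255 = repUnit n := by
  rw [← repUnit_mul n]
  exact Int.mul_ediv_cancel _ (by norm_num)

theorem repUnit_nonneg (n : Nat) : 0 ≤ repUnit n := by
  induction n with
  | zero => simp [repUnit]
  | succ n ih => simp only [repUnit]; omega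

-- base-256 digits determine the repeated-byte pattern and conversely
theorem digits_iff_rep (n : Nat) (p : Int) (hp0 : 0 ≤ p) (hp : p < 256) :
    ∀ x : Int, 0 ≤ x → x < 256 ^ n →
      ((∀ i : Nat, i < n → x / 256 ^ i % 256 = p) ↔ x = p * repUnit n) := by
  induction n with
  | zero =>
    intro x hx0 hx
    simp only [repUnit, mul_zero, pow_zero] at *
    constructor
    · intro _; omega
    · intro _ i hi; omega
  | succ n ih =>
    intro x hx0 hx
    have h256pos : (0 : Int) < 256 ^ n := by positivity
    have hxdy : 256 * (x / 256) + x % 256 = x := Int.ediv_add_emod x 256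
    have hd0 : 0 ≤ x % 256 := Int.emod_nonneg x (by norm_num)
    have hd256 : x % 256 < 256 := Int.emod_lt_of_pos x (by norm_num)
    have hy0 : 0 ≤ x / 256 := Int.ediv_nonneg hx0 (by norm_num)
    have hyn : x / 256 < 256 ^ n := by
      rw [Int.ediv_lt_iff_lt_mul (by norm_num)]
      rw [pow_succ] at hx
      linarith
    have hrep0 : 0 ≤ p * repUnit n := mul_nonneg hp0 (repUnit_nonneg n)
    have hrepb : p * repUnit n < 256 ^ n := by
      have h1 : p * repUnit n ≤ 255 * repUnit n :=
        mul_le_mul_of_nonneg_right (by omega) (repUnit_nonneg n)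
      have h2 := repUnit_mul n
      linarith
    have hdig : ∀ i : Nat, x / 256 ^ (i + 1) % 256 = x / 256 / 256 ^ i % 256 := by
      intro i
      have e : (256 : Int) * 256 ^ i = 256 ^ (i + 1) := by ring
      rw [Int.ediv_ediv_of_nonneg (by norm_num : (0:Int) ≤ 256), e]
    constructor
    · intro h
      have h0 : x % 256 = p := by simpa using h 0 (by omega)
      have hRest : ∀ i : Nat, i < n → x / 256 / 256 ^ i % 256 = p := by
        intro i hi
        rw [← hdig i]
        exact h (i + 1) (by omega)
      have hyv := (ih (x / 256) hy0 hyn).mp hRest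
      rw [hyv, h0] at hxdy
      simp only [repUnit]
      linear_combination -hxdy
    · intro hxeq
      have hx2 : x = 256 * (p * repUnit n) + p := by
        rw [hxeq]; simp only [repUnit]; ring
      have hdp : x % 256 = p ∧ x / 256 = p * repUnit n := by omega
      intro i hi
      match i with
      | 0 => simpa using hdp.1
      | j + 1 =>
        rw [hdig j]
        exact (ih (x / 256) hy0 hyn).mpr hdp.2 j (by omega)

-- the i-th byte of block only depends on block mod 256^n when i < n
theorem digit_emod (block : Int) (n i : Nat) (hi : i < n) :
    block % 256 ^ n / 256 ^ i % 256 = block / 256 ^ i % 256 := by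
  have hdecomp := Int.ediv_add_emod block (256 ^ n)
  have h256 : (256 : Int) ^ n = 256 ^ i * (256 * 256 ^ (n - i - 1)) := by
    have hn : n = i + 1 + (n - i - 1) := by omega
    calc (256 : Int) ^ n = 256 ^ (i + 1 + (n - i - 1)) := by rw [← hn]
    _ = 256 ^ i * (256 * 256 ^ (n - i - 1)) := by
        rw [pow_add, pow_add, pow_one]; ring
  have hblock : block = block % 256 ^ n + 256 ^ i * (256 * (256 ^ (n - i - 1) * (block / 256 ^ n))) := by
    linear_combination (-1 : Int) * hdecomp + (block / 256 ^ n) * h256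
  conv_rhs => rw [hblock]
  rw [Int.add_mul_ediv_left _ _ (by positivity : (256 : Int) ^ i ≠ 0),
      Int.add_mul_emod_self_left]

theorem loop_char (block pad : Int) (l : List Int) :
    remove_padding_v2_loop block pad l =
      if ∀ i ∈ l, PySem.Int.band (block >>> (8 * i).toNat) 0xff = pad
      then (block >>> (8 * pad).toNat, 8 - pad) else (block, 8) := by
  induction l with
  | nil => simp [remove_padding_v2_loop]
  | cons i rest ih =>
    by_cases h : PySem.Int.band (block >>> (8 * i).toNat) 0xff = pad
    · simp [remove_padding_v2_loop, h, ih]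
    · simp [remove_padding_v2_loop, h]

-- the j-th byte of block, as A's loop body computes it
theorem byte_eq (block : Int) (j : Nat) :
    PySem.Int.band (block >>> (8 * (j : Int)).toNat) 0xff = block / 256 ^ j % 256 := by
  have h1 : (8 * (j : Int)).toNat = 8 * j := by omega
  have h2 : block >>> (8 * j) = block / 256 ^ j := by
    rw [Int.shiftRight_eq_div_pow]
    congr 1
    push_cast
    rw [pow_mul]
    norm_num
  have h3 : (0xff : Int) = 2 ^ 8 - 1 := by norm_num
  rw [h1, h2, h3, band_two_pow_sub_one]
  norm_num

-- ===== VERDICT (by name: the statement is the Claim_ definition above) =====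
theorem remove_padding_v2_spec : Claim_equal_remove_padding_v2 := by
  intro block _
  unfold Spec_remove_padding_v2 remove_padding_v2 remove_padding_v2_alt
  have h3 : (0xff : Int) = 2 ^ 8 - 1 := by norm_num
  have hpadeq : PySem.Int.band block 0xff = block % 256 := by
    rw [h3, band_two_pow_sub_one]; norm_num
  set pad := PySem.Int.band block 0xff with hpad
  have hpad0 : 0 ≤ pad := by rw [hpadeq]; exact Int.emod_nonneg _ (by norm_num)
  have hpadlt : pad < 256 := by rw [hpadeq]; exact Int.emod_lt_of_pos _ (by norm_num)
  by_cases hgt : pad > 0x10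
  · simp only [if_pos hgt]
  · simp only [if_neg hgt]
    set n := pad.toNat with hn
    have hpn : pad = (n : Int) := by omega
    have hshift : (8 * pad).toNat = 8 * n := by omega
    have h256pos : (0 : Int) < 256 ^ n := by positivity
    have hpow : ((2 : Int)) ^ (8 * n) = 256 ^ n := by
      rw [pow_mul]; norm_num
    have hmask : ((1 : Int) <<< (8 * pad).toNat) - 1 = 2 ^ (8 * n) - 1 := by
      rw [hshift, Int.shiftLeft_eq, one_mul]
    have hbandmask : PySem.Int.band block (((1 : Int) <<< (8 * pad).toNat) - 1) = block % 256 ^ n := by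
      rw [hmask, band_two_pow_sub_one, hpow]
    have hexp : PySem.Int.floordiv (((1 : Int) <<< (8 * pad).toNat) - 1) 0xff = repUnit n := by
      rw [hmask, hpow, PySem.Int.floordiv_eq_ediv_of_pos (by norm_num)]
      norm_num [repUnit_ediv n]
    have hx0 : 0 ≤ block % 256 ^ n := Int.emod_nonneg _ (by positivity)
    have hxlt : block % 256 ^ n < 256 ^ n := Int.emod_lt_of_pos _ h256pos
    have hiff : (∀ i ∈ PySem.List.pyRange 0 pad 1,
          PySem.Int.band (block >>> (8 * i).toNat) 0xff = pad) ↔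
        block % 256 ^ n = pad * repUnit n := by
      rw [← digits_iff_rep n pad hpad0 hpadlt _ hx0 hxlt]
      constructor
      · intro h i hi
        have hmem : (i : Int) ∈ PySem.List.pyRange 0 pad 1 := by
          rw [PySem.List.mem_pyRange_one]; omega
        have hb := h _ hmem
        rw [byte_eq block i] at hb
        rw [digit_emod block n i hi, hb]
      · intro h i hmem
        rw [PySem.List.mem_pyRange_one] at hmem
        obtain ⟨hi0, hilt⟩ := hmem
        have hj : i = ((i.toNat : Nat) : Int) := by omega
        rw [hj, byte_eq block i.toNat, ← digit_emod block n i.toNat (by omega)]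
        exact h i.toNat (by omega)
    rw [loop_char]
    by_cases hc : block % 256 ^ n = pad * repUnit n
    · rw [if_pos (hiff.mpr hc),
          if_neg (by rw [hbandmask, hexp]; exact not_not_intro hc)]
    · rw [if_neg (fun h => hc (hiff.mp h)),
          if_pos (by rw [hbandmask, hexp]; exact hc)]
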